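-- pv_equiv track=rewrite | github.com/josef-lin/advent-of-code | 2024/07_bridge_repair.py | possible_ans_2
-- ===== SOURCE A (Python) =====
-- def possible_ans_2(target, vals):
--     if len(vals) == 1:
--         possible = [vals[0]]
--     elif len(vals) == 2:
--         possible = [vals[0]+vals[1], vals[0]*vals[1], int(str(vals[0])+str(vals[1]))]
--     else:
--         sum_results = possible_ans_2(target, [vals[0]+vals[1]]+vals[2:])
--         prod_results = possible_ans_2(target, [vals[0]*vals[1]]+vals[2:])
--         cat_results = possible_ans_2(target, [int(str(vals[0])+str(vals[1]))]+vals[2:])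
--         possible = sum_results+prod_results+cat_results
--     possible = [p for p in possible if p <= target]
--     return possible
-- ===== SOURCE B (Python) =====
-- def possible_ans_2(target, vals):
--     results = [vals[0]]
--     for v in vals[1:]:
--         new = []
--         for r in results:
--             new.append(r + v)
--             new.append(r * v)
--             new.append(int(str(r) + str(v)))
--         results = new
--     return [p for p in results if p <= target]
-- ===== Notes on version B (the rewrite author's own statement) =====
-- stated objective: simpler
-- what changed: Replaces A's three-way recursion on the value list (which filters the result list at every recursion level) with a single iterative loop that expands a list of reachable partials left-to-right and filters once at the end.
import Mathlib
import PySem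

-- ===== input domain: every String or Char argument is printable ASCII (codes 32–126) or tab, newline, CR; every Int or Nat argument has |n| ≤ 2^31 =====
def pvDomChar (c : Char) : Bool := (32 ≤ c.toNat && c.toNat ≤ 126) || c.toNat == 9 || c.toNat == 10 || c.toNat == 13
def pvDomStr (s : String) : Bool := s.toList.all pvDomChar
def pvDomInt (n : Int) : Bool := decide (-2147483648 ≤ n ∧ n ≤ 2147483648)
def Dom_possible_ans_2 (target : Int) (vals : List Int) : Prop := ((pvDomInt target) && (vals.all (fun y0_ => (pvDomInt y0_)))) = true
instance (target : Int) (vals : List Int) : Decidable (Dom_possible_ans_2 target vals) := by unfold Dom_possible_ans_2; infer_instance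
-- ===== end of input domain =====

-- B replaces A's ternary recursion (which re-filters at every level) with a single
-- iterative left-to-right expansion of a partials list, filtering once at the end (simpler).


-- ===== PORT A =====
-- int(str(a) + str(b)); PySem.Int.ofStr? is none exactly where Python raises ValueError
-- (b < 0), which Pre_possible_ans_2 excludes; the .getD 0 default is never reached there.
def pyCat (a b : Int) : Int :=
  (PySem.Int.ofChars? (PySem.Int.toChars a ++ PySem.Int.toChars b)).getD 0

def possible_ans_2 (target : Int) (vals : List Int) : List Int :=
  match vals with
  | [a] => ([a]).filter (fun p => p ≤ target)
  | [a, b] => ([a + b, a * b, pyCat a b]).filter (fun p => p ≤ target)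
  | a :: b :: rest =>
      -- len(vals) ≥ 3: three recursive calls, concatenated, then filtered
      (possible_ans_2 target ((a + b) :: rest) ++
       possible_ans_2 target ((a * b) :: rest) ++
       possible_ans_2 target (pyCat a b :: rest)).filter (fun p => p ≤ target)
  | [] => []   -- Python raises IndexError here (vals[0]); excluded by Pre_possible_ans_2
termination_by vals.length
decreasing_by all_goals simp

-- ===== PORT B =====
def possible_ans_2_alt (target : Int) (vals : List Int) : List Int :=
  match vals with
  | [] => []   -- Python raises IndexError here (vals[0]); excluded by Pre_possible_ans_2
  | v0 :: rest =>
      let results :=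
        rest.foldl (fun acc v =>
          acc.foldl (fun new r => new ++ [r + v, r * v, pyCat r v]) []) [v0]
      results.filter (fun p => p ≤ target)

-- ===== PRECONDITION & SPEC =====
-- Pre_ excludes exactly the inputs where the Python A raises: empty vals (IndexError on
-- vals[0]) and a negative value after the first (ValueError in int(str(r)+str(v))).
def Pre_possible_ans_2 (target : Int) (vals : List Int) : Prop :=
  vals ≠ [] ∧ ∀ v ∈ vals.drop 1, 0 ≤ v
instance (target : Int) (vals : List Int) : Decidable (Pre_possible_ans_2 target vals) := by
  unfold Pre_possible_ans_2; infer_instance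

def pvWitness_possible_ans_2 : Int × List Int := (292, [11, 6, 16, 20])

def Spec_possible_ans_2 (target : Int) (vals : List Int) (out : List Int) : Prop := out = possible_ans_2_alt target vals
instance (target : Int) (vals : List Int) (out : List Int) : Decidable (Spec_possible_ans_2 target vals out) := by unfold Spec_possible_ans_2; infer_instance

-- ===== CLAIM (what is proved, stated in full; the proofs are below) =====
def Claim_equal_possible_ans_2 : Prop := ∀ (target : Int) (vals : List Int), Dom_possible_ans_2 target vals → Pre_possible_ans_2 target vals → Spec_possible_ans_2 target vals (possible_ans_2 target vals)

-- ===== LEMMAS AND PROOFS =====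

-- B's expansion loop, as a function of the seed list of partials.
def pvExpand (rest : List Int) (seed : List Int) : List Int :=
  rest.foldl (fun acc v =>
    acc.foldl (fun new r => new ++ [r + v, r * v, pyCat r v]) []) seed

theorem pvExpand_nil (seed : List Int) : pvExpand [] seed = seed := rfl

theorem pvExpand_cons (v : Int) (rest seed : List Int) :
    pvExpand (v :: rest) seed =
      pvExpand rest (seed.flatMap (fun r => [r + v, r * v, pyCat r v])) := by
  simp [pvExpand, List.flatMap]

theorem pvExpand_append (rest l1 l2 : List Int) :
    pvExpand rest (l1 ++ l2) = pvExpand rest l1 ++ pvExpand rest l2 := by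
  induction rest generalizing l1 l2 with
  | nil => simp [pvExpand_nil]
  | cons v rs ih => simp [pvExpand_cons, ih]

-- A's recursion equals "expand fully, filter once at the end".
theorem possible_ans_2_eq_expand (target : Int) (x : Int) (rest : List Int) :
    possible_ans_2 target (x :: rest) =
      (pvExpand rest [x]).filter (fun p => p ≤ target) := by
  match rest with
  | [] => simp [possible_ans_2, pvExpand_nil]
  | [b] =>
    simp [possible_ans_2, pvExpand_cons, pvExpand_nil]
  | b :: c :: rs =>
    have h1 := possible_ans_2_eq_expand target (x + b) (c :: rs)
    have h2 := possible_ans_2_eq_expand target (x * b) (c :: rs)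
    have h3 := possible_ans_2_eq_expand target (pyCat x b) (c :: rs)
    have hseed : pvExpand (b :: c :: rs) [x] =
        pvExpand (c :: rs) [x + b] ++ pvExpand (c :: rs) [x * b] ++ pvExpand (c :: rs) [pyCat x b] := by
      rw [pvExpand_cons]
      have hfm : ([x].flatMap (fun r => [r + b, r * b, pyCat r b])) =
          [x + b] ++ [x * b] ++ [pyCat x b] := by simp
      rw [hfm, pvExpand_append, pvExpand_append]
    rw [possible_ans_2, h1, h2, h3, hseed, List.filter_append, List.filter_append,
        List.filter_filter, List.filter_filter, List.filter_filter]
    · simp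
    · intro h; cases h
termination_by rest.length

-- ===== VERDICT (by name: the statement is the Claim_ definition above) =====
theorem possible_ans_2_spec : Claim_equal_possible_ans_2 := by
  intro target vals _ hpre
  unfold Spec_possible_ans_2
  match vals with
  | [] => exact absurd rfl hpre.1
  | x :: rest =>
    rw [possible_ans_2_eq_expand]
    simp [possible_ans_2_alt, pvExpand]
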